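-- pv_equiv track=rewrite | github.com/Ace1928/eidosian_forge | archive_forge/src/archive_forge/func_is_valid_as_number.py | is_valid_as_number
-- ===== SOURCE A (Python) =====
-- def is_valid_as_number(as_number):
--     """check as-number is valid"""
--     if as_number.isdigit():
--         if int(as_number) > 4294967295 or int(as_number) < 1:
--             return False
--         return True
--     else:
--         if as_number.find('.') != -1:
--             number_list = as_number.split('.')
--             if len(number_list) != 2:
--                 return False
--             if number_list[1] == 0:
--                 return False
--             for each_num in number_list:
--                 if not each_num.isdigit():
--                     return False
--                 if int(each_num) > 65535:
--                     return False
--             return True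
--         return False
-- ===== SOURCE B (Python) =====
-- def is_valid_as_number(as_number):
--     """check as-number is valid"""
--     dot = -1
--     for i, ch in enumerate(as_number):
--         if ch == '.':
--             if dot != -1:
--                 return False
--             dot = i
--         elif not ('0' <= ch <= '9'):
--             return False
--     if dot == -1:
--         if not as_number:
--             return False
--         return 1 <= int(as_number) <= 4294967295
--     head, tail = as_number[:dot], as_number[dot + 1:]
--     if not head or not tail:
--         return False
--     return int(head) <= 65535 and int(tail) <= 65535
-- ===== Notes on version B (the rewrite author's own statement) =====
-- stated objective: alternative
-- what changed: Replaced A's builtin-based branching (isdigit / find / split on the dot separator plus a loop over the parts) by a single manual character scan that records the position of the one allowed dot and rejects any other non-digit, followed by slice-and-convert range checks on the at most two pieces.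
import Mathlib
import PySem

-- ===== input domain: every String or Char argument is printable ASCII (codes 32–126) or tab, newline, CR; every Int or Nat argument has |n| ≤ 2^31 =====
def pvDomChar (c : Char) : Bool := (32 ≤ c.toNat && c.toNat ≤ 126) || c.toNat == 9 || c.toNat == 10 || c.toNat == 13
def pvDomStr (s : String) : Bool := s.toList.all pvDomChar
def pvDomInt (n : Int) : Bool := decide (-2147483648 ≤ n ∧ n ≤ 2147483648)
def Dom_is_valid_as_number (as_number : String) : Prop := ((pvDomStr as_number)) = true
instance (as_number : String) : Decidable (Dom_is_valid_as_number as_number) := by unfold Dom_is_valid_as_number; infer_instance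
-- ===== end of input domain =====

-- B replaces A's builtin-based branching (isdigit/find/split('.') + loop over parts) by one manual character scan recording the single allowed dot position, then slice-and-convert range checks (alternative decomposition, same cost).


-- ===== PORT A =====
-- A's for-loop over number_list: return False on the first part that is not all digits or exceeds 65535
def pvAEachNum : List (List Char) → Bool
  | [] => true
  | s :: rest =>
    if !(PySem.Chars.strIsdigit s) then false
    else if (PySem.Int.ofChars? s).getD 0 > 65535 then false
    else pvAEachNum rest

def is_valid_as_number (as_number : String) : Bool :=
  if PySem.Str.strIsdigit as_number then
    -- int(as_number): guarded by isdigit, so ofStr? is some here; getD 0 is exact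
    if (PySem.Int.ofStr? as_number).getD 0 > 4294967295 || (PySem.Int.ofStr? as_number).getD 0 < 1 then false
    else true
  else
    if PySem.Str.find as_number "." != -1 then
      -- as_number.split('.') with its nonempty separator: Chars.splitOn (Str.split? is some here)
      let number_list := PySem.Chars.splitOn as_number.toList ['.']
      if number_list.length != 2 then false
      -- Python's 'if number_list[1] == 0' compares a str with the int 0: always False, a dead branch
      else pvAEachNum number_list
    else false

-- ===== PORT B =====
-- B's for-loop over enumerate(as_number): early return False is `none`; otherwise `some dot`
-- with `dot` the recorded dot position (Python's -1 sentinel is the `none` of the Option)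
def pvBScan : List Char → Nat → Option Nat → Option (Option Nat)
  | [], _, dot => some dot
  | c :: rest, i, dot =>
    if c = '.' then
      match dot with
      | some _ => none
      | none => pvBScan rest (i + 1) (some i)
    else if decide ('0' ≤ c) && decide (c ≤ '9') then pvBScan rest (i + 1) dot
    else none

def is_valid_as_number_alt (as_number : String) : Bool :=
  match pvBScan as_number.toList 0 none with
  | none => false
  | some none =>
    if as_number.toList.isEmpty then false
    else decide (1 ≤ (PySem.Int.ofChars? as_number.toList).getD 0) && decide ((PySem.Int.ofChars? as_number.toList).getD 0 ≤ 4294967295)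
  | some (some d) =>
    -- as_number[:dot] / as_number[dot+1:]: dot is an in-range non-negative index, so the slices are take/drop (exact)
    if (as_number.toList.take d).isEmpty || (as_number.toList.drop (d + 1)).isEmpty then false
    else decide ((PySem.Int.ofChars? (as_number.toList.take d)).getD 0 ≤ 65535) && decide ((PySem.Int.ofChars? (as_number.toList.drop (d + 1))).getD 0 ≤ 65535)

-- ===== PRECONDITION & SPEC =====
def Spec_is_valid_as_number (as_number : String) (out : Bool) : Prop := out = is_valid_as_number_alt as_number
instance (as_number : String) (out : Bool) : Decidable (Spec_is_valid_as_number as_number out) := by unfold Spec_is_valid_as_number; infer_instance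

-- ===== CLAIM (what is proved, stated in full; the proofs are below) =====
def Claim_equal_is_valid_as_number : Prop := ∀ (as_number : String), Dom_is_valid_as_number as_number → Spec_is_valid_as_number as_number (is_valid_as_number as_number)

-- ===== LEMMAS AND PROOFS =====

-- a digit string contains no '.'
theorem pv_dot_not_mem_of_isdigit (cs : List Char) (h : cs.all PySem.Chars.isdigit = true) :
    '.' ∉ cs := by
  intro hmem
  have := (List.all_eq_true.mp h) '.' hmem
  simp [PySem.Chars.isdigit] at this

-- one step of splitOn.go with the single-char separator '.'
theorem pv_go_step (fuel : Nat) (c : Char) (rest cur : List Char) (acc : List (List Char)) :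
    PySem.Chars.splitOn.go ['.'] (fuel+1) (c :: rest) cur acc =
      if c = '.' then PySem.Chars.splitOn.go ['.'] fuel rest [] (cur.reverse :: acc)
      else PySem.Chars.splitOn.go ['.'] fuel rest (c :: cur) acc := by
  by_cases hc : c = '.'
  · subst hc; simp [PySem.Chars.splitOn.go, List.isPrefixOf]
  · simp [PySem.Chars.splitOn.go, List.isPrefixOf, Ne.symm hc, hc]

-- splitOn.go on a chunk without the separator just closes the current piece
theorem pv_go_no_sep (fuel : Nat) (l cur : List Char) (acc : List (List Char))
    (h : '.' ∉ l) :
    PySem.Chars.splitOn.go ['.'] fuel l cur acc = acc.reverse ++ [cur.reverse ++ l] := by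
  induction fuel generalizing l cur acc with
  | zero => simp [PySem.Chars.splitOn.go]
  | succ fuel ih =>
    cases l with
    | nil => simp [PySem.Chars.splitOn.go]
    | cons c rest =>
      have hc : c ≠ '.' := fun hh => h (hh ▸ List.mem_cons_self)
      have hrest : '.' ∉ rest := fun hh => h (List.mem_cons_of_mem _ hh)
      rw [pv_go_step, if_neg hc, ih rest (c :: cur) acc hrest]
      simp

-- splitOn.go consumes a separator-free prefix into cur
theorem pv_go_prefix (a : List Char) (ha : '.' ∉ a) (fuel : Nat) (l cur : List Char) (acc : List (List Char)) :
    PySem.Chars.splitOn.go ['.'] (a.length + fuel) (a ++ l) cur acc =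
      PySem.Chars.splitOn.go ['.'] fuel l (a.reverse ++ cur) acc := by
  induction a generalizing cur with
  | nil => simp
  | cons c a' ih =>
    have hc : c ≠ '.' := fun hh => ha (hh ▸ List.mem_cons_self)
    have ha' : '.' ∉ a' := fun hh => ha (List.mem_cons_of_mem _ hh)
    have : (c :: a').length + fuel = (a'.length + fuel) + 1 := by simp; omega
    rw [this, List.cons_append, pv_go_step, if_neg hc, ih ha' (c :: cur)]
    simp

-- splitOn.go on a chunk containing the separator produces at least two more pieces
theorem pv_go_sep_len (fuel : Nat) (l cur : List Char) (acc : List (List Char))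
    (hmem : '.' ∈ l) (hfuel : l.length ≤ fuel) :
    acc.length + 2 ≤ (PySem.Chars.splitOn.go ['.'] fuel l cur acc).length := by
  induction fuel generalizing l cur acc with
  | zero =>
    cases l with
    | nil => simp at hmem
    | cons c rest => simp at hfuel
  | succ fuel ih =>
    cases l with
    | nil => simp at hmem
    | cons c rest =>
      rw [pv_go_step]
      by_cases hc : c = '.'
      · rw [if_pos hc]
        by_cases hr : '.' ∈ rest
        · have := ih rest [] (cur.reverse :: acc) hr (by simp at hfuel; omega)
          simp only [List.length_cons] at this ⊢
          omega
        · rw [pv_go_no_sep fuel rest [] (cur.reverse :: acc) hr]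
          simp
      · rw [if_neg hc]
        have hr : '.' ∈ rest := by
          cases hmem with
          | head => exact absurd rfl hc
          | tail _ h => exact h
        exact ih rest (c :: cur) acc hr (by simp at hfuel; omega)

-- splitOn with exactly one dot gives the two surrounding pieces
theorem pv_splitOn_one_dot (a b : List Char) (ha : '.' ∉ a) (hb : '.' ∉ b) :
    PySem.Chars.splitOn (a ++ '.' :: b) ['.'] = [a, b] := by
  unfold PySem.Chars.splitOn
  have hlen : (a ++ '.' :: b).length + 1 = a.length + (b.length + 2) := by simp; omega
  rw [hlen, pv_go_prefix a ha, pv_go_step, if_pos rfl, pv_go_no_sep _ _ _ _ hb]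
  simp

-- splitOn with two or more dots has at least three pieces
theorem pv_splitOn_two_dots_len (a b : List Char) (ha : '.' ∉ a) (hb : '.' ∈ b) :
    3 ≤ (PySem.Chars.splitOn (a ++ '.' :: b) ['.']).length := by
  unfold PySem.Chars.splitOn
  have hlen : (a ++ '.' :: b).length + 1 = a.length + (b.length + 2) := by simp; omega
  rw [hlen, pv_go_prefix a ha, pv_go_step, if_pos rfl]
  have := pv_go_sep_len (b.length + 1) b [] [(a.reverse).reverse] hb (by omega)
  simpa using this

-- first-occurrence decomposition at '.'
theorem pv_first_dot (cs : List Char) (h : '.' ∈ cs) :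
    ∃ a b, cs = a ++ '.' :: b ∧ '.' ∉ a := by
  induction cs with
  | nil => simp at h
  | cons c rest ih =>
    by_cases hc : c = '.'
    · exact ⟨[], rest, by simp [hc], by simp⟩
    · have hr : '.' ∈ rest := by
        cases h with
        | head => exact absurd rfl hc
        | tail _ h => exact h
      obtain ⟨a, b, heq, hna⟩ := ih hr
      exact ⟨c :: a, b, by simp [heq], by simp [Ne.symm hc, hna]⟩

-- B's scan over a dot-free list in the pre-dot state
theorem pv_scan_no_dot (cs : List Char) (h : '.' ∉ cs) (i : Nat) :
    pvBScan cs i none = if cs.all PySem.Chars.isdigit then some none else none := by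
  induction cs generalizing i with
  | nil => simp [pvBScan]
  | cons c rest ih =>
    have hc : c ≠ '.' := fun hh => h (hh ▸ List.mem_cons_self)
    have hrest : '.' ∉ rest := fun hh => h (List.mem_cons_of_mem _ hh)
    by_cases hd : PySem.Chars.isdigit c = true
    · have hd' := hd
      simp only [PySem.Chars.isdigit] at hd'
      simp [pvBScan, hc, hd', ih hrest, hd]
    · have hd' : (decide ('0' ≤ c) && decide (c ≤ '9')) = false := by
        simpa [PySem.Chars.isdigit] using hd
      simp [pvBScan, hc, hd', hd]

-- B's scan after the dot: valid iff the rest is all digits (a second dot fails isdigit)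
theorem pv_scan_some (cs : List Char) (d : Nat) (i : Nat) :
    pvBScan cs i (some d) =
      if cs.all PySem.Chars.isdigit then some (some d) else none := by
  induction cs generalizing i with
  | nil => simp [pvBScan]
  | cons c rest ih =>
    by_cases hc : c = '.'
    · subst hc
      simp [pvBScan, PySem.Chars.isdigit]
    · by_cases hd : PySem.Chars.isdigit c = true
      · have hd' := hd
        simp only [PySem.Chars.isdigit] at hd'
        simp [pvBScan, hc, hd', ih, hd]
      · have hd' : (decide ('0' ≤ c) && decide (c ≤ '9')) = false := by
          simpa [PySem.Chars.isdigit] using hd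
        simp [pvBScan, hc, hd', hd]

-- B's scan over the pre-dot chunk reaches the dot with its position recorded
theorem pv_scan_through (a : List Char) (ha : '.' ∉ a) (l : List Char) (i : Nat) :
    pvBScan (a ++ '.' :: l) i none =
      if a.all PySem.Chars.isdigit then pvBScan l (i + a.length + 1) (some (i + a.length)) else none := by
  induction a generalizing i with
  | nil => simp [pvBScan]
  | cons c a' ih =>
    have hc : c ≠ '.' := fun hh => ha (hh ▸ List.mem_cons_self)
    have ha' : '.' ∉ a' := fun hh => ha (List.mem_cons_of_mem _ hh)
    by_cases hd : PySem.Chars.isdigit c = true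
    · have hd' := hd
      simp only [PySem.Chars.isdigit] at hd'
      have harith1 : i + 1 + a'.length + 1 = i + (c :: a').length + 1 := by simp; omega
      have harith2 : i + 1 + a'.length = i + (c :: a').length := by simp; omega
      simp only [List.cons_append, pvBScan, if_neg hc, hd']
      rw [ih ha', harith1, harith2]
      simp [hd]
    · have hd' : (decide ('0' ≤ c) && decide (c ≤ '9')) = false := by
        simpa [PySem.Chars.isdigit] using hd
      simp [pvBScan, hc, hd', hd]

-- the single-number branch: A's if-form equals B's interval check
theorem pv_range_eq (n : Int) :
    (if (decide (n > 4294967295) || decide (n < 1)) = true then false else true)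
      = (decide (1 ≤ n) && decide (n ≤ 4294967295)) := by
  by_cases h1 : n < 1
  · have h1' : ¬ (1 ≤ n) := by omega
    simp [h1, h1']
  · by_cases h2 : n > 4294967295
    · have h2' : ¬ (n ≤ 4294967295) := by omega
      simp [h2, h2']
    · have ha : 1 ≤ n := by omega
      have hb : n ≤ 4294967295 := by omega
      simp [h1, h2, ha, hb]

-- the two-part branch: A's loop over [a, b] equals B's emptiness-then-bounds form,
-- given both parts are all digits
theorem pv_loop_pair (a b : List Char) (hda : a.all PySem.Chars.isdigit = true)
    (hdb : b.all PySem.Chars.isdigit = true) :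
    pvAEachNum [a, b] =
      (if a.isEmpty || b.isEmpty then false
       else decide ((PySem.Int.ofChars? a).getD 0 ≤ 65535) && decide ((PySem.Int.ofChars? b).getD 0 ≤ 65535)) := by
  simp only [pvAEachNum, PySem.Chars.strIsdigit, hda, hdb, Bool.and_true]
  by_cases hae : a.isEmpty
  · simp [hae]
  · by_cases hbe : b.isEmpty
    · by_cases h1 : (PySem.Int.ofChars? a).getD 0 > 65535 <;> simp [hae, hbe, h1]
    · by_cases h1 : (PySem.Int.ofChars? a).getD 0 > 65535
      · have h1' : ¬ ((PySem.Int.ofChars? a).getD 0 ≤ 65535) := by omega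
        simp [hae, hbe, h1, h1']
      · have h1' : (PySem.Int.ofChars? a).getD 0 ≤ 65535 := by omega
        by_cases h2 : (PySem.Int.ofChars? b).getD 0 > 65535
        · have h2' : ¬ ((PySem.Int.ofChars? b).getD 0 ≤ 65535) := by omega
          simp [hae, hbe, h1, h1', h2, h2']
        · have h2' : (PySem.Int.ofChars? b).getD 0 ≤ 65535 := by omega
          simp [hae, hbe, h1, h1', h2, h2']

-- ===== VERDICT (by name: the statement is the Claim_ definition above) =====
theorem is_valid_as_number_spec : Claim_equal_is_valid_as_number := by
  intro s _
  unfold Spec_is_valid_as_number is_valid_as_number is_valid_as_number_alt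
  by_cases hm : '.' ∈ s.toList
  · -- at least one dot: A's isdigit branch is off
    have hnall : s.toList.all PySem.Chars.isdigit = false := by
      by_cases hh : s.toList.all PySem.Chars.isdigit = true
      · exact absurd hm (pv_dot_not_mem_of_isdigit _ hh)
      · simpa using hh
    have hsd : PySem.Str.strIsdigit s = false := by
      simp [PySem.Str.strIsdigit, PySem.Chars.strIsdigit, hnall]
    have hfind : (PySem.Str.find s "." != -1) = true := by
      simp only [bne_iff_ne, ne_eq, PySem.Str.find_eq, PySem.Chars.find_ne_neg_one_iff]
      exact (List.singleton_infix_iff _ _).mpr hm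
    rw [hsd]
    simp only [Bool.false_eq_true, if_false, if_pos hfind]
    obtain ⟨a, b, heq, hna⟩ := pv_first_dot s.toList hm
    rw [heq, pv_scan_through a hna b 0]
    by_cases hda : a.all PySem.Chars.isdigit = true
    · rw [if_pos hda, pv_scan_some]
      by_cases hmb : '.' ∈ b
      · -- a second dot: both sides reject
        have hndb : b.all PySem.Chars.isdigit = false := by
          by_cases hh : b.all PySem.Chars.isdigit = true
          · exact absurd hmb (pv_dot_not_mem_of_isdigit _ hh)
          · simpa using hh
        have hlen := pv_splitOn_two_dots_len a b hna hmb
        have hne : ((PySem.Chars.splitOn (a ++ '.' :: b) ['.']).length != 2) = true := by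
          simp only [bne_iff_ne, ne_eq]; omega
        simp [hndb, hne]
      · -- exactly one dot: split gives [a, b], scan records position a.length
        rw [pv_splitOn_one_dot a b hna hmb]
        by_cases hdb : b.all PySem.Chars.isdigit = true
        · rw [if_pos hdb, pv_loop_pair a b hda hdb]
          simp
        · have hndb : b.all PySem.Chars.isdigit = false := by simpa using hdb
          have hA : pvAEachNum [a, b] = false := by
            simp only [pvAEachNum, PySem.Chars.strIsdigit, hda, hndb, Bool.and_true, Bool.and_false]
            by_cases hae : a.isEmpty <;> by_cases h1 : (PySem.Int.ofChars? a).getD 0 > 65535 <;>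
              simp [hae, h1]
          simp [hndb, hA]
    · -- non-digit before the dot: both sides reject
      have hnda : a.all PySem.Chars.isdigit = false := by simpa using hda
      simp only [hnda, Bool.false_eq_true, if_false]
      by_cases hmb : '.' ∈ b
      · have hlen := pv_splitOn_two_dots_len a b hna hmb
        have hne : ((PySem.Chars.splitOn (a ++ '.' :: b) ['.']).length != 2) = true := by
          simp only [bne_iff_ne, ne_eq]; omega
        simp [hne]
      · rw [pv_splitOn_one_dot a b hna hmb]
        have hA : pvAEachNum [a, b] = false := by
          simp [pvAEachNum, PySem.Chars.strIsdigit, hnda]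
        simp [hA]
  · -- no dot at all
    have hfind : PySem.Chars.find s.toList ['.'] = -1 := by
      rw [PySem.Chars.find_eq_neg_one_iff]
      exact fun hin => hm ((List.singleton_infix_iff _ _).mp hin)
    rw [pv_scan_no_dot s.toList hm 0]
    by_cases hall : s.toList.all PySem.Chars.isdigit = true
    · rw [if_pos hall]
      by_cases hse : s.toList.isEmpty
      · have hsd : PySem.Str.strIsdigit s = false := by
          simp [PySem.Str.strIsdigit, PySem.Chars.strIsdigit, hse]
        rw [hsd]
        simp [hse, hfind]
      · have hsd : PySem.Str.strIsdigit s = true := by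
          simp only [PySem.Str.strIsdigit, PySem.Chars.strIsdigit, hall, Bool.and_true]
          simpa using hse
        rw [hsd]
        simp only [if_true, hse, Bool.false_eq_true, if_false]
        simpa [PySem.Int.ofStr?] using pv_range_eq ((PySem.Int.ofStr? s).getD 0)
    · have hnall : s.toList.all PySem.Chars.isdigit = false := by simpa using hall
      have hsd : PySem.Str.strIsdigit s = false := by
        simp [PySem.Str.strIsdigit, PySem.Chars.strIsdigit, hnall]
      rw [hsd]
      simp [hfind, hnall]
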